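-- pv_equiv track=rewrite | github.com/cjrzs/MyLeetCode | 其他/独一无二的出现次数.py | uniqueOccurrences2
-- ===== SOURCE A (Python) =====
-- from typing import List
--
-- def uniqueOccurrences2(arr: List[int]) -> bool:
--     """
--     两个hash。
--     :param arr:
--     :return:
--     """
--     tmp = {}
--     for i in range(len(arr)):
--         if arr[i] not in tmp:
--             tmp[arr[i]] = 1
--         else:
--             tmp[arr[i]] += 1
--     tmp2 = {}
--     for i in tmp:
--         if tmp[i] in tmp2:
--             return False
--         else:
--             tmp2[tmp[i]] = 1
--     return True
-- ===== SOURCE B (Python) =====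
-- from typing import List
--
--
-- def uniqueOccurrences2(arr: List[int]) -> bool:
--     cnt = {}
--     for x in arr:
--         cnt[x] = cnt.get(x, 0) + 1
--     vals = sorted(cnt.values())
--     for a, b in zip(vals, vals[1:]):
--         if a == b:
--             return False
--     return True
-- ===== Notes on version B (the rewrite author's own statement) =====
-- stated objective: alternative
-- what changed: The second dictionary (hash-set membership test over the counts) is replaced by sorting the count values once and scanning adjacent pairs for an equal neighbour; the counting loop is folded into a single get(x,0)+1 update instead of the in/not-in branch.
import Mathlib
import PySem

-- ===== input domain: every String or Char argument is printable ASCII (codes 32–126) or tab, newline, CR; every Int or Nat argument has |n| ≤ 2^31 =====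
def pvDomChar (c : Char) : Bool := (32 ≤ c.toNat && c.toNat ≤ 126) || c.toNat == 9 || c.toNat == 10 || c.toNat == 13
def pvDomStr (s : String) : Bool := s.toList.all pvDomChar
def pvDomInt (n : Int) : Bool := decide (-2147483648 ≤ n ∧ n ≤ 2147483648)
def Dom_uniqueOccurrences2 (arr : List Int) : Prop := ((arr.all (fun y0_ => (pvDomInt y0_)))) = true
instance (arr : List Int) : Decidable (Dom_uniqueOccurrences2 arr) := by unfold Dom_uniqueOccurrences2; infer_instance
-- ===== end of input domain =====

-- B replaces A's second hash-set pass by sorting the count values and scanning adjacent pairs (alternative decomposition, same behaviour).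

-- ===== PORT A =====
-- second loop of A: 'for i in tmp: if tmp[i] in tmp2: return False else: tmp2[tmp[i]] = 1'
def uoLoop2 (tmp : PySem.Dict Int Int) : List Int → PySem.Dict Int Int → Bool
  | [], _ => true
  | k :: rest, tmp2 =>
      if tmp2.contains (tmp.getD k 0) then false
      else uoLoop2 tmp rest (tmp2.insert (tmp.getD k 0) 1)

def uniqueOccurrences2 (arr : List Int) : Bool :=
  -- 'tmp[arr[i]] += 1' is read-then-store; getD is exact here (the else-branch runs only when the key is present)
  let tmp := (PySem.List.pyRange 0 (PySem.List.len arr) 1).foldl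
    (fun d i =>
      if d.contains (PySem.List.pyGetD arr i 0) = false
      then d.insert (PySem.List.pyGetD arr i 0) 1
      else d.insert (PySem.List.pyGetD arr i 0) (d.getD (PySem.List.pyGetD arr i 0) 0 + 1))
    PySem.Dict.empty
  uoLoop2 tmp tmp.keys PySem.Dict.empty

-- ===== PORT B =====
-- 'for a, b in zip(vals, vals[1:]): if a == b: return False' then 'return True'
def uoPairScan : List (Int × Int) → Bool
  | [] => true
  | (a, b) :: rest => if a = b then false else uoPairScan rest

def uniqueOccurrences2_alt (arr : List Int) : Bool :=
  let cnt := arr.foldl (fun d x => d.insert x (d.getD x 0 + 1)) PySem.Dict.empty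
  let vals := PySem.List.sorted cnt.values (fun v => v) false
  uoPairScan (vals.zip (PySem.List.slice vals (some 1) none))

-- ===== PRECONDITION & SPEC =====
def Spec_uniqueOccurrences2 (arr : List Int) (out : Bool) : Prop := out = uniqueOccurrences2_alt arr
instance (arr : List Int) (out : Bool) : Decidable (Spec_uniqueOccurrences2 arr out) := by unfold Spec_uniqueOccurrences2; infer_instance

-- ===== CLAIM (what is proved, stated in full; the proofs are below) =====
def Claim_equal_uniqueOccurrences2 : Prop := ∀ (arr : List Int), Dom_uniqueOccurrences2 arr → Spec_uniqueOccurrences2 arr (uniqueOccurrences2 arr)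

-- ===== LEMMAS AND PROOFS =====

-- the common value both programs test for distinctness: the list of counts in first-occurrence order
def uoV (arr : List Int) : List Int := (PySem.Set.ofList arr).map (fun k => (arr.count k : Int))

lemma uoCountFold_eq (arr : List Int) :
    (PySem.List.pyRange 0 (PySem.List.len arr) 1).foldl
      (fun d i =>
        if d.contains (PySem.List.pyGetD arr i 0) = false
        then d.insert (PySem.List.pyGetD arr i 0) 1
        else d.insert (PySem.List.pyGetD arr i 0) (d.getD (PySem.List.pyGetD arr i 0) 0 + 1))
      PySem.Dict.empty
      = PySem.Dict.counter arr := by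
  rw [PySem.List.foldl_pyRange_pyGetD (a := 0) (xs := arr)
    (f := fun (d : PySem.Dict Int Int) (x : Int) =>
        if d.contains x = false then d.insert x 1 else d.insert x (d.getD x 0 + 1))
    (d := 0) (init := PySem.Dict.empty) (by norm_num)]
  have hfg : (fun (d : PySem.Dict Int Int) (x : Int) =>
        if d.contains x = false then d.insert x 1 else d.insert x (d.getD x 0 + 1))
      = fun d x => d.insert x (d.getD x 0 + 1) := by
    funext d x
    by_cases h : d.contains x = false
    · rw [if_pos h, PySem.Dict.getD_of_not_contains (h := h)]; norm_num
    · simp [h]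
  simp only [Int.toNat_zero, List.drop_zero, hfg,
    PySem.Dict.foldl_insert_getD_add_one_eq_counter]

lemma uoLoop2_eq (tmp : PySem.Dict Int Int) (ks : List Int) (tmp2 : PySem.Dict Int Int) :
    uoLoop2 tmp ks tmp2
      = decide ((ks.map (fun k => tmp.getD k 0)).Nodup ∧
          ∀ v ∈ ks.map (fun k => tmp.getD k 0), tmp2.contains v = false) := by
  induction ks generalizing tmp2 with
  | nil => simp [uoLoop2]
  | cons k rest ih =>
    simp only [uoLoop2, List.map_cons]
    by_cases h : tmp2.contains (tmp.getD k 0) = true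
    · rw [if_pos h]
      symm
      simp only [decide_eq_false_iff_not, not_and]
      intro _ hall
      have := hall _ (List.mem_cons_self ..)
      simp [this] at h
    · rw [if_neg h, ih, decide_eq_decide]
      replace h : tmp2.contains (tmp.getD k 0) = false := by
        simpa using h
      simp only [PySem.Dict.contains_insert, Bool.or_eq_false_iff,
        beq_eq_false_iff_ne, List.nodup_cons, List.mem_cons, forall_eq_or_imp,
        List.mem_map]
      constructor
      · rintro ⟨hnd, hall⟩
        refine ⟨⟨?_, hnd⟩, h, fun w hw => (hall w hw).2⟩
        rintro ⟨x, hx, hxv⟩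
        exact (hall _ ⟨x, hx, rfl⟩).1 hxv
      · rintro ⟨⟨hnm, hnd⟩, _, hall⟩
        refine ⟨hnd, fun w hw => ⟨?_, hall w hw⟩⟩
        rintro rfl
        exact hnm hw

lemma uoPairScan_eq (l : List Int) (h : l.Pairwise (· ≤ ·)) :
    uoPairScan (l.zip l.tail) = decide l.Nodup := by
  induction l with
  | nil => simp [uoPairScan]
  | cons a t ih =>
    cases t with
    | nil => simp [uoPairScan]
    | cons b t2 =>
      simp only [List.tail_cons, List.zip_cons_cons, uoPairScan]
      rcases List.pairwise_cons.mp h with ⟨hle, ht⟩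
      by_cases hab : a = b
      · subst hab
        simp
      · rw [if_neg hab]
        have hrec := ih ht
        simp only [List.tail_cons] at hrec
        rw [hrec, decide_eq_decide]
        constructor
        · intro hnd
          refine List.nodup_cons.mpr ⟨?_, hnd⟩
          intro hmem
          rcases List.mem_cons.mp hmem with rfl | hmem2
          · exact hab rfl
          · have hab' : a < b := lt_of_le_of_ne (hle b (by simp)) hab
            have hba : b ≤ a := (List.pairwise_cons.mp ht).1 a hmem2
            omega
        · intro hnd
          exact (List.nodup_cons.mp hnd).2

lemma uoKeysMap_eq (arr : List Int) :
    ((PySem.Dict.counter arr : PySem.Dict Int Int).keys.map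
      (fun k => (PySem.Dict.counter arr).getD k 0)) = uoV arr := by
  rw [PySem.Dict.keys_counter]
  unfold uoV
  apply List.map_congr_left
  intro x _
  exact PySem.Dict.getD_counter arr x

lemma uoValues_eq (arr : List Int) :
    (PySem.Dict.counter arr : PySem.Dict Int Int).values = uoV arr := by
  have h1 : (PySem.Dict.counter arr : PySem.Dict Int Int).values
      = (PySem.Dict.counter arr).items.map Prod.snd := rfl
  rw [h1, PySem.Dict.items_counter]
  simp [uoV, List.map_map, Function.comp]

lemma uoA_eq (arr : List Int) : uniqueOccurrences2 arr = decide (uoV arr).Nodup := by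
  unfold uniqueOccurrences2
  simp only [uoCountFold_eq, uoLoop2_eq, uoKeysMap_eq]
  simp [PySem.Dict.contains_empty]

lemma uoB_eq (arr : List Int) : uniqueOccurrences2_alt arr = decide (uoV arr).Nodup := by
  unfold uniqueOccurrences2_alt
  simp only [PySem.Dict.foldl_insert_getD_add_one_eq_counter, uoValues_eq,
    PySem.List.slice_from_one]
  rw [uoPairScan_eq _ (by simpa using PySem.List.sorted_pairwise (uoV arr) (fun v => v)),
    decide_eq_decide]
  exact (PySem.List.sorted_perm ..).nodup_iff

-- ===== VERDICT (by name: the statement is the Claim_ definition above) =====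
theorem uniqueOccurrences2_spec : Claim_equal_uniqueOccurrences2 := by
  intro arr _
  unfold Spec_uniqueOccurrences2
  rw [uoA_eq, uoB_eq]
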